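-- pv_equiv track=rewrite | github.com/Gerloutis/automacao | planejamento.py | maior_sequencia_faltas
-- ===== SOURCE A (Python) =====
-- def maior_sequencia_faltas(valores):
--     max_seq = 0
--     atual = 0
--
--     for v in valores:
--         if v in ("F", "AT"):
--             atual += 1
--             max_seq = max(max_seq, atual)
--         else:
--             atual = 0
--
--     return max_seq
-- ===== SOURCE B (Python) =====
-- from itertools import groupby
--
-- def maior_sequencia_faltas(valores):
--     lengths = [sum(1 for _ in grp)
--                for absent, grp in groupby(valores, key=lambda v: v in ("F", "AT"))
--                if absent]
--     return max(lengths, default=0)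
-- ===== Notes on version B (the rewrite author's own statement) =====
-- stated objective: idiomatic
-- what changed: replaces the running counter+max loop by itertools.groupby over the absence predicate: materialize the lengths of the maximal absence runs, then take their max with default 0
import Mathlib
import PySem

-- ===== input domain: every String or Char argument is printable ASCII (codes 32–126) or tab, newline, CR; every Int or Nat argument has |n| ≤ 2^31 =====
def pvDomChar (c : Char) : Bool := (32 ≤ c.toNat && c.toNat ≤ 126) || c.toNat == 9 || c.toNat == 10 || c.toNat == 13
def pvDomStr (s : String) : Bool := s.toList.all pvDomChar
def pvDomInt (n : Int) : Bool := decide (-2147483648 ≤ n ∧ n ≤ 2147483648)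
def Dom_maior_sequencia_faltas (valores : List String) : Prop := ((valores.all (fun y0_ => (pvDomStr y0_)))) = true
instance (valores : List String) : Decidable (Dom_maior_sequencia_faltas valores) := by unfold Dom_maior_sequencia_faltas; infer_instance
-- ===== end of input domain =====

-- B replaces A's running counter+max loop by grouping the list into maximal runs of
-- absence markers ("F"/"AT") and taking the max of the run lengths (idiomatic groupby style).

-- ===== PORT A =====
-- running state (max_seq, atual), one step per element, exactly A's loop
def pvStepA (st : Int × Int) (v : String) : Int × Int :=
  if v == "F" || v == "AT" then (max st.1 (st.2 + 1), st.2 + 1) else (st.1, 0)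

def maior_sequencia_faltas (valores : List String) : Int :=
  (valores.foldl pvStepA (0, 0)).1

-- ===== PORT B =====
-- the absence predicate (Source B's key function)
def pvAbsent (v : String) : Bool := v == "F" || v == "AT"

-- lengths of the maximal runs of absence markers (Source B's groupby + per-group sum)
def pvRunLens : List String → List Int
  | [] => []
  | v :: rest =>
    if pvAbsent v then
      (1 + (rest.takeWhile pvAbsent).length) :: pvRunLens (rest.dropWhile pvAbsent)
    else pvRunLens rest
termination_by xs => xs.length
decreasing_by
  · exact Nat.lt_succ_of_le (List.length_dropWhile_le ..)
  · simp

-- max(lengths, default=0)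
def maior_sequencia_faltas_alt (valores : List String) : Int :=
  (pvRunLens valores).foldl max 0

-- ===== PRECONDITION & SPEC =====
def Spec_maior_sequencia_faltas (valores : List String) (out : Int) : Prop := out = maior_sequencia_faltas_alt valores
instance (valores : List String) (out : Int) : Decidable (Spec_maior_sequencia_faltas valores out) := by unfold Spec_maior_sequencia_faltas; infer_instance

-- ===== CLAIM (what is proved, stated in full; the proofs are below) =====
def Claim_equal_maior_sequencia_faltas : Prop := ∀ (valores : List String), Dom_maior_sequencia_faltas valores → Spec_maior_sequencia_faltas valores (maior_sequencia_faltas valores)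

-- ===== LEMMAS AND PROOFS =====

-- stepping A's loop through a whole run of absences from counter c
theorem pvFoldA_run (run rest : List String) (h : ∀ v ∈ run, pvAbsent v = true)
    (m c : Int) (hc0 : 0 ≤ c) (hcm : c ≤ m) :
    List.foldl pvStepA (m, c) (run ++ rest)
      = List.foldl pvStepA (max m (c + run.length), c + run.length) rest := by
  induction run generalizing m c with
  | nil => simp [max_eq_left hcm]
  | cons v vs ih =>
    have hv : pvAbsent v = true := h v (by simp)
    simp only [List.cons_append, List.foldl_cons, pvStepA]
    rw [if_pos (by simpa [pvAbsent] using hv)]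
    rw [ih (fun w hw => h w (by simp [hw])) (max m (c + 1)) (c + 1) (by omega) (le_max_right ..)]
    congr 2
    · simp only [List.length_cons]
      push_cast
      omega
    · simp only [List.length_cons]
      push_cast
      omega

-- A's loop from (m, 0) computes foldl max m over the run lengths
theorem pvFoldA_eq_runLens : ∀ (n : ℕ) (xs : List String), xs.length ≤ n → ∀ m : Int,
    (List.foldl pvStepA (m, 0) xs).1 = (pvRunLens xs).foldl max m := by
  intro n
  induction n with
  | zero =>
    intro xs h m
    have : xs = [] := List.eq_nil_of_length_eq_zero (Nat.le_zero.mp h)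
    subst this; simp [pvRunLens]
  | succ n ih =>
    intro xs h m
    match xs with
    | [] => simp [pvRunLens]
    | v :: rest =>
      by_cases hv : pvAbsent v = true
      · rw [pvRunLens]
        rw [if_pos hv]
        simp only [List.foldl_cons, pvStepA]
        rw [if_pos (by simpa [pvAbsent] using hv)]
        have hsplit : rest = rest.takeWhile pvAbsent ++ rest.dropWhile pvAbsent :=
          (List.takeWhile_append_dropWhile (p := pvAbsent) (l := rest)).symm
        set run := rest.takeWhile pvAbsent with hrun
        set rest' := rest.dropWhile pvAbsent with hrest'
        have hall : ∀ w ∈ run, pvAbsent w = true := fun w hw => List.mem_takeWhile_imp hw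
        conv_lhs => rw [hsplit]
        simp only [zero_add]
        rw [pvFoldA_run run rest' hall (max m 1) 1 (by omega) (le_max_right ..)]
        have hlen' : rest'.length ≤ n := by
          have h1 : rest'.length ≤ rest.length := List.length_dropWhile_le ..
          simp only [List.length_cons] at h
          omega
        match hr : rest' with
        | [] =>
          simp only [List.foldl_nil, pvRunLens]
          omega
        | w :: rest'' =>
          have hw : pvAbsent w = false := by
            have := List.head?_dropWhile_not pvAbsent rest
            rw [← hrest'] at this
            simpa using this
          simp only [List.foldl_cons, pvStepA]
          rw [if_neg (by simpa [pvAbsent] using hw)]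
          rw [pvRunLens]
          rw [if_neg (by simp [hw])]
          have hlen'' : rest''.length ≤ n := by
            simp only [List.length_cons] at hlen'; omega
          rw [ih rest'' hlen'']
          congr 1
          omega
      · rw [pvRunLens, if_neg hv]
        simp only [List.foldl_cons, pvStepA]
        rw [if_neg (by simpa [pvAbsent] using hv)]
        have : rest.length ≤ n := by simp at h; omega
        exact ih rest this m

-- ===== VERDICT (by name: the statement is the Claim_ definition above) =====
theorem maior_sequencia_faltas_spec : Claim_equal_maior_sequencia_faltas := by
  intro valores _
  unfold Spec_maior_sequencia_faltas maior_sequencia_faltas maior_sequencia_faltas_alt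
  exact pvFoldA_eq_runLens valores.length valores le_rfl 0
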